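-- pv_equiv track=rewrite | github.com/phenom4n4n/advent-of-code | 2020/solutions/d9.py | check_contiguous
-- ===== SOURCE A (Python) =====
-- def check_contiguous(data: list[int], n: int) -> list[int]:
--     total = 0
--     used = []
--     for i in data:
--         total += i
--         used.append(i)
--         if total == n:
--             return used
--     return []
-- ===== SOURCE B (Python) =====
-- def check_contiguous(data: list[int], n: int) -> list[int]:
--     prefix = []
--     t = 0
--     for x in data:
--         t += x
--         prefix.append(t)
--     if n in prefix:
--         return data[:prefix.index(n) + 1]
--     return []
-- ===== Notes on version B (the rewrite author's own statement) =====
-- stated objective: alternative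
-- what changed: A tests the running sum inside a single accumulate-and-return loop; B first builds the full prefix-sum table, then locates n in it and returns the corresponding slice of data.
import Mathlib
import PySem

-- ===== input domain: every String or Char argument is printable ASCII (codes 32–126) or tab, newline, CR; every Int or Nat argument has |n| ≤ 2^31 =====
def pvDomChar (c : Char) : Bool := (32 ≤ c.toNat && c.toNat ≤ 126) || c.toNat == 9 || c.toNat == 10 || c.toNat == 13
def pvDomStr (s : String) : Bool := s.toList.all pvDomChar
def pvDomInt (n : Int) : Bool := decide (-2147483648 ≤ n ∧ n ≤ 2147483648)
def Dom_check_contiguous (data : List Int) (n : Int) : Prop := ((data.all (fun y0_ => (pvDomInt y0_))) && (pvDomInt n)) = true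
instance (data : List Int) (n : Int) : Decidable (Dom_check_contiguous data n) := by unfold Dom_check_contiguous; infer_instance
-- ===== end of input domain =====

-- B replaces A's single accumulate-and-test loop by a prefix-sum table built up front
-- followed by a separate membership/index lookup and slice (alternative decomposition).

-- ===== PORT A =====
-- A's for-loop with running state (total, used); returns used the moment total == n.
def checkGoA (data : List Int) (total : Int) (used : List Int) (n : Int) : List Int :=
  match data with
  | [] => []
  | i :: rest =>
    let total' := total + i
    let used' := used ++ [i]
    if total' == n then used' else checkGoA rest total' used' n

def check_contiguous (data : List Int) (n : Int) : List Int :=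
  checkGoA data 0 [] n

-- ===== PORT B =====
-- B's first pass: build the prefix-sum table (t is the running sum).
def prefTable (data : List Int) (t : Int) : List Int :=
  match data with
  | [] => []
  | x :: xs => (t + x) :: prefTable xs (t + x)

def check_contiguous_alt (data : List Int) (n : Int) : List Int :=
  let pfx := prefTable data 0
  -- 'if n in pfx: return data[:pfx.index(n)+1]' / 'return []'
  match PySem.List.index? pfx n with
  | some i => PySem.List.slice data none (some ((i : Int) + 1))
  | none => []

-- ===== PRECONDITION & SPEC =====
def Spec_check_contiguous (data : List Int) (n : Int) (out : List Int) : Prop := out = check_contiguous_alt data n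
instance (data : List Int) (n : Int) (out : List Int) : Decidable (Spec_check_contiguous data n out) := by unfold Spec_check_contiguous; infer_instance

-- ===== CLAIM (what is proved, stated in full; the proofs are below) =====
def Claim_equal_check_contiguous : Prop := ∀ (data : List Int) (n : Int), Dom_check_contiguous data n → Spec_check_contiguous data n (check_contiguous data n)

-- ===== LEMMAS AND PROOFS =====

-- A's loop computes: find n in the prefix-sum table starting at t, return used ++ prefix of data.
theorem checkGoA_eq (data : List Int) : ∀ (t : Int) (u : List Int) (n : Int),
    checkGoA data t u n =
      match PySem.List.index? (prefTable data t) n with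
      | some i => u ++ data.take (i + 1)
      | none => [] := by
  induction data with
  | nil => intro t u n; simp [checkGoA, prefTable, PySem.List.index?]
  | cons x xs ih =>
    intro t u n
    by_cases h : t + x = n
    · subst h
      rw [show prefTable (x :: xs) t = (t + x) :: prefTable xs (t + x) from rfl,
        PySem.List.index?_cons_self]
      simp [checkGoA]
    · rw [show checkGoA (x :: xs) t u n = checkGoA xs (t + x) (u ++ [x]) n from by
        simp [checkGoA, h]]
      rw [ih (t + x) (u ++ [x]) n]
      rw [show prefTable (x :: xs) t = (t + x) :: prefTable xs (t + x) from rfl]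
      rw [PySem.List.index?_cons_of_ne _ h]
      cases PySem.List.index? (prefTable xs (t + x)) n with
      | none => simp
      | some i => simp [List.take_succ_cons, List.append_assoc]

-- ===== VERDICT (by name: the statement is the Claim_ definition above) =====
theorem check_contiguous_spec : Claim_equal_check_contiguous := by
  intro data n _
  unfold Spec_check_contiguous check_contiguous check_contiguous_alt
  rw [checkGoA_eq]
  cases h : PySem.List.index? (prefTable data 0) n with
  | none => simp only [h]
  | some i =>
    simp only [h]
    rw [show ((i : Int) + 1) = ((i + 1 : Nat) : Int) from by push_cast; ring,
      PySem.List.slice_to_natCast, List.nil_append]
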